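-- pv_equiv track=rewrite | github.com/miliar/Code_Jam_Webscraper | solutions_python/Problem_155/3171.py | num_people
-- ===== SOURCE A (Python) =====
-- def num_people(length, data):
--     add_people = 0
--     sum = 0;
--     for x in range(0, length+1):
--         while( (sum + add_people )< x):
--             add_people +=1
--         sum = sum + data[x]
--     return add_people
-- ===== SOURCE B (Python) =====
-- def num_people(length, data):
--     def enough(k):
--         s = 0
--         for x in range(length + 1):
--             if s + k < x:
--                 return False
--             s += data[x]
--         return True
--
--     if length < 0:
--         return 0
--     neg = 0
--     for x in range(length + 1):
--         if data[x] < 0: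
--             neg -= data[x]
--     lo = -1
--     hi = length + neg + 1
--     while hi - lo > 1:
--         mid = (lo + hi) // 2
--         if enough(mid):
--             hi = mid
--         else:
--             lo = mid
--     return hi
-- ===== Notes on version B (the rewrite author's own statement) =====
-- stated objective: faster
-- what changed: Instead of simulating the ovation and incrementing add_people one unit at a time (cost proportional to the answer), B binary-searches for the smallest sufficient number of invited friends, using a feasibility scan enough(k) over the prefix sums and a first pass that bounds the search interval.
import Mathlib
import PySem

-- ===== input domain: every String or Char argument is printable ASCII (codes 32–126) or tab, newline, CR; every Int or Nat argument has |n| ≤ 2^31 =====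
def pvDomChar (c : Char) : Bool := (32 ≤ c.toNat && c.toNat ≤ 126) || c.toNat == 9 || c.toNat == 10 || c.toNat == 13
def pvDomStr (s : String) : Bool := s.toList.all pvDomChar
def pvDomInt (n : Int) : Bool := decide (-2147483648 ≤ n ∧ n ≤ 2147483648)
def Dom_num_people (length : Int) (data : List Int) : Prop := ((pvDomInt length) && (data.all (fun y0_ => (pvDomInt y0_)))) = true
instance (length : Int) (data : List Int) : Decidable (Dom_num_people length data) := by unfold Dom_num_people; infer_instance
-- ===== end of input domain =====

-- B replaces A's incremental simulation (inner while-loop growing add_people) by a binary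
-- search for the smallest sufficient number of invited friends, with a feasibility scan
-- enough(k); alternative algorithm, return values proved equal on Pre_.

-- ===== PORT A =====
-- the inner 'while (sum + add_people) < x: add_people += 1' loop of A, with an exact
-- fuel bound as the structural-termination guard (the loop runs at most (x - s - add) times)
def pvWhileAddAux : Nat → Int → Int → Int → Int
  | 0, _, _, add => add
  | n + 1, x, s, add => if s + add < x then pvWhileAddAux n x s (add + 1) else add

def pvWhileAdd (x s add : Int) : Int :=
  pvWhileAddAux (x - s - add).toNat x s add

def num_people (length : Int) (data : List Int) : Int :=
  ((PySem.List.pyRange 0 (length + 1) 1).foldl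
    (fun (st : Int × Int) x =>
      let add := pvWhileAdd x st.2 st.1
      (add, st.2 + (PySem.List.pyGet? data x).getD 0))  -- data[x]; out-of-range raises in Python, excluded by Pre_
    (0, 0)).1

-- ===== PORT B =====
-- enough(k) of Source B: scan the checks; early 'return False' becomes the first false branch
def pvEnough (data : List Int) : List Int → Int → Int → Bool
  | [], _, _ => true
  | x :: rest, k, s =>
      if s + k < x then false
      else pvEnough data rest k (s + (PySem.List.pyGet? data x).getD 0)

-- the 'while hi - lo > 1' bisection loop of Source B (terminates: the bracket shrinks)
def pvBS (length : Int) (data : List Int) (lo hi : Int) : Int :=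
  if h : hi - lo > 1 then
    let mid := PySem.Int.floordiv (lo + hi) 2
    if pvEnough data (PySem.List.pyRange 0 (length + 1) 1) mid 0 then
      pvBS length data lo mid
    else
      pvBS length data mid hi
  else hi
termination_by (hi - lo).toNat
decreasing_by
  · have := (PySem.Int.floordiv_lt_iff_lt_mul (a := lo + hi) (b := 2) (q := hi) (by omega)).mpr (by omega)
    have := (PySem.Int.le_floordiv_iff_mul_le (a := lo + hi) (b := 2) (q := lo + 1) (by omega)).mpr (by omega)
    omega
  · have := (PySem.Int.floordiv_lt_iff_lt_mul (a := lo + hi) (b := 2) (q := hi) (by omega)).mpr (by omega)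
    have := (PySem.Int.le_floordiv_iff_mul_le (a := lo + hi) (b := 2) (q := lo + 1) (by omega)).mpr (by omega)
    omega

def num_people_alt (length : Int) (data : List Int) : Int :=
  if length < 0 then 0
  else
    let neg := (PySem.List.pyRange 0 (length + 1) 1).foldl
      (fun n x => if (PySem.List.pyGet? data x).getD 0 < 0
                  then n - (PySem.List.pyGet? data x).getD 0 else n) 0
    pvBS length data (-1) (length + neg + 1)

-- ===== PRECONDITION & SPEC =====
-- Pre_: the loop reads data[0..length], so Python raises IndexError unless length < len(data)
-- (vacuously satisfied when length < 0, where the loop body never runs).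
def Pre_num_people (length : Int) (data : List Int) : Prop := length < (data.length : Int)
instance (length : Int) (data : List Int) : Decidable (Pre_num_people length data) := by unfold Pre_num_people; infer_instance
def pvWitness_num_people : Int × List Int := (2, [1, 0, 2])

def Spec_num_people (length : Int) (data : List Int) (out : Int) : Prop := out = num_people_alt length data
instance (length : Int) (data : List Int) (out : Int) : Decidable (Spec_num_people length data out) := by unfold Spec_num_people; infer_instance

-- ===== CLAIM (what is proved, stated in full; the proofs are below) =====
def Claim_equal_num_people : Prop := ∀ (length : Int) (data : List Int), Dom_num_people length data → Pre_num_people length data → Spec_num_people length data (num_people length data)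

-- ===== LEMMAS AND PROOFS =====

-- the common yardstick: the max of 0 and all deficits x - prefix along the index list
def pvGo (data : List Int) : List Int → Int → Int
  | [], _ => 0
  | x :: rest, s => max (x - s) (pvGo data rest (s + (PySem.List.pyGet? data x).getD 0))

theorem pvGo_nonneg (data : List Int) (xs : List Int) (s : Int) : 0 ≤ pvGo data xs s := by
  induction xs generalizing s with
  | nil => simp [pvGo]
  | cons x rest ih => simp only [pvGo]; exact le_max_of_le_right (ih _)

theorem pvWhileAddAux_eq (n : Nat) (x s add : Int) (h : (x - s - add).toNat ≤ n) :
    pvWhileAddAux n x s add = max add (x - s) := by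
  induction n generalizing add with
  | zero => rw [pvWhileAddAux]; omega
  | succ n ih =>
    rw [pvWhileAddAux]
    split_ifs with hc
    · rw [ih (add + 1) (by omega)]; omega
    · omega

theorem pvWhileAdd_eq (x s add : Int) : pvWhileAdd x s add = max add (x - s) :=
  pvWhileAddAux_eq _ x s add le_rfl

-- A's fold computes max add (pvGo xs s) for a nonnegative running add
theorem foldA_eq (data : List Int) (xs : List Int) (add s : Int) (hadd : 0 ≤ add) :
    (xs.foldl
      (fun (st : Int × Int) x =>
        let a := pvWhileAdd x st.2 st.1
        (a, st.2 + (PySem.List.pyGet? data x).getD 0)) (add, s)).1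
    = max add (pvGo data xs s) := by
  induction xs generalizing add s with
  | nil => simp [pvGo]; omega
  | cons x rest ih =>
    simp only [List.foldl_cons, pvGo]
    rw [pvWhileAdd_eq]
    rw [ih (max add (x - s)) _ (le_max_of_le_left hadd)]
    omega

-- enough(k) for a nonnegative k is exactly "k covers every deficit", i.e. pvGo ≤ k
theorem pvEnough_iff (data : List Int) (xs : List Int) (k s : Int) (hk : 0 ≤ k) :
    pvEnough data xs k s = true ↔ pvGo data xs s ≤ k := by
  induction xs generalizing s with
  | nil => simp [pvEnough, pvGo]; omega
  | cons x rest ih =>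
    simp only [pvEnough, pvGo]
    split_ifs with hc
    · simp; omega
    · rw [ih]; omega

-- neg pass: the fold accumulates the (nonnegative) sum of negative parts
theorem foldNeg_eq (data : List Int) (xs : List Int) (n : Int) :
    xs.foldl (fun n x => if (PySem.List.pyGet? data x).getD 0 < 0
                  then n - (PySem.List.pyGet? data x).getD 0 else n) n
    = n + (xs.map (fun x => max (-(PySem.List.pyGet? data x).getD 0) 0)).sum := by
  induction xs generalizing n with
  | nil => simp
  | cons x rest ih =>
    simp only [List.foldl_cons, List.map_cons, List.sum_cons]
    rw [ih]
    split_ifs with hc <;> omega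

-- upper bound: every deficit is at most (max index) + (total negative part)
theorem pvGo_le (data : List Int) (xs : List Int) (s L : Int)
    (hx : ∀ x ∈ xs, x ≤ L) :
    pvGo data xs s ≤ max 0 (L + (xs.map (fun x => max (-(PySem.List.pyGet? data x).getD 0) 0)).sum - s) := by
  induction xs generalizing s with
  | nil => simp [pvGo]
  | cons x rest ih =>
    simp only [pvGo, List.map_cons, List.sum_cons]
    have h1 : x ≤ L := hx x (List.mem_cons_self ..)
    have h2 := ih (s + (PySem.List.pyGet? data x).getD 0) (fun y hy => hx y (List.mem_cons_of_mem _ hy))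
    have h3 : 0 ≤ (rest.map (fun x => max (-(PySem.List.pyGet? data x).getD 0) 0)).sum := by
      apply List.sum_nonneg; intro y hy
      simp only [List.mem_map] at hy
      obtain ⟨z, _, rfl⟩ := hy
      omega
    omega

-- bisection: with a valid bracket lo < D ≤ hi (lo ≥ -1), pvBS returns D = pvGo r 0
theorem pvBS_eq (length : Int) (data : List Int) (lo hi : Int)
    (hlo : -1 ≤ lo)
    (h1 : lo < pvGo data (PySem.List.pyRange 0 (length + 1) 1) 0)
    (h2 : pvGo data (PySem.List.pyRange 0 (length + 1) 1) 0 ≤ hi) :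
    pvBS length data lo hi = pvGo data (PySem.List.pyRange 0 (length + 1) 1) 0 := by
  generalize hfuel : (hi - lo).toNat = n
  induction n using Nat.strong_induction_on generalizing lo hi with
  | _ n ih =>
    rw [pvBS]
    split_ifs with hgt
    · have hm1 := (PySem.Int.floordiv_lt_iff_lt_mul (a := lo + hi) (b := 2) (q := hi) (by omega)).mpr (by omega)
      have hm2 := (PySem.Int.le_floordiv_iff_mul_le (a := lo + hi) (b := 2) (q := lo + 1) (by omega)).mpr (by omega)
      set mid := PySem.Int.floordiv (lo + hi) 2 with hmid
      by_cases he : pvEnough data (PySem.List.pyRange 0 (length + 1) 1) mid 0 = true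
      · rw [if_pos he]
        have hd := (pvEnough_iff data _ mid 0 (by omega)).mp he
        exact ih ((mid - lo).toNat) (by omega) lo mid hlo h1 hd rfl
      · rw [if_neg he]
        have hd : ¬ pvGo data (PySem.List.pyRange 0 (length + 1) 1) 0 ≤ mid := by
          intro hc; exact he ((pvEnough_iff data _ mid 0 (by omega)).mpr hc)
        exact ih ((hi - mid).toNat) (by omega) mid hi (by omega) (by omega) h2 rfl
    · omega

-- ===== VERDICT (by name: the statement is the Claim_ definition above) =====
theorem num_people_spec : Claim_equal_num_people := by
  intro length data _ _
  unfold Spec_num_people num_people num_people_alt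
  rw [foldA_eq data _ 0 0 le_rfl]
  by_cases hneg : length < 0
  · rw [if_pos hneg, PySem.List.pyRange_one_eq_nil (by omega)]
    simp [pvGo]
  · rw [if_neg hneg, foldNeg_eq]
    rw [pvBS_eq]
    · have := pvGo_nonneg data (PySem.List.pyRange 0 (length + 1) 1) 0
      omega
    · omega
    · have := pvGo_nonneg data (PySem.List.pyRange 0 (length + 1) 1) 0
      omega
    · have hb := pvGo_le data (PySem.List.pyRange 0 (length + 1) 1) 0 length
        (fun x hx => by
          have := (PySem.List.mem_pyRange_one).mp hx
          omega)
      have h3 : 0 ≤ ((PySem.List.pyRange 0 (length + 1) 1).map (fun x => max (-(PySem.List.pyGet? data x).getD 0) 0)).sum := by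
        apply List.sum_nonneg; intro y hy
        simp only [List.mem_map] at hy
        obtain ⟨z, _, rfl⟩ := hy
        omega
      omega
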